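-- pv_equiv track=rewrite | github.com/smachra/word_ladder | word_ladder.py | _adjacent2
-- ===== SOURCE A (Python) =====
-- def _adjacent2(word1, word2, num):
--     if num == 4:
--         return True
--     if len(word1) == 0:
--         return False
--     if word1[0] == word2[0]:
--         return _adjacent2(word1[1:], word2[1:], num + 1)
--     if word1[0] != word2[0]:
--         return _adjacent2(word1[1:], word2[1:], num)
-- ===== SOURCE B (Python) =====
-- def _adjacent2(word1, word2, num):
--     i = 0
--     while True:
--         if num == 4:
--             return True
--         if i >= len(word1):
--             return False
--         if word1[i] == word2[i]:
--             num += 1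
--         i += 1
-- ===== Notes on version B (the rewrite author's own statement) =====
-- stated objective: alternative
-- what changed: Replaced the slicing recursion with an index-based while loop that keeps a running counter, removing the per-step O(n) slice copies and recursion depth.
import Mathlib
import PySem

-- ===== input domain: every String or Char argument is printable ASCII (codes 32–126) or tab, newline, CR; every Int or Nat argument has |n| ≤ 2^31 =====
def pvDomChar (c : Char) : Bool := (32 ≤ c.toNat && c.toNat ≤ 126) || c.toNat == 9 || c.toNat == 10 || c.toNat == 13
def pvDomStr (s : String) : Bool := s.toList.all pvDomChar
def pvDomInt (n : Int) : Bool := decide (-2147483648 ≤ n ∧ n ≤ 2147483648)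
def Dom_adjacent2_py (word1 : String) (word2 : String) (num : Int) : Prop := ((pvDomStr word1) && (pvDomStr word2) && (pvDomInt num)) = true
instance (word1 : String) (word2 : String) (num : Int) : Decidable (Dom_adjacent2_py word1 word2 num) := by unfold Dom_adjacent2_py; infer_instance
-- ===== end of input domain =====

-- B iterates with an index and a running counter instead of A's slicing recursion; return values are identical wherever A returns (Pre_ excludes the inputs where A raises IndexError).

-- ===== PORT A =====
-- A's recursion on the shrinking word1/word2 slices (word2[0] on empty word2 raises in Python; the
-- mismatch branch taken here for that case lies outside Pre_).
def aGo : List Char → List Char → Int → Bool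
  | l1, l2, num =>
    if num = 4 then true
    else
      match l1 with
      | [] => false
      | c :: rest =>
        if some c == l2.head? then aGo rest l2.tail (num + 1)
        else aGo rest l2.tail num

def adjacent2_py (word1 : String) (word2 : String) (num : Int) : Bool :=
  aGo word1.toList word2.toList num

-- ===== PORT B =====
-- B's while loop: index i, running counter num (word2[i] out of range raises in Python; the
-- mismatch branch taken here for that case lies outside Pre_).
def altLoop (l1 l2 : List Char) (num : Int) (i : Nat) : Bool :=
  if num = 4 then true
  else if l1.length ≤ i then false
  else
    altLoop l1 l2 (if l1[i]? == l2[i]? then num + 1 else num) (i + 1)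
termination_by l1.length - i
decreasing_by omega

def adjacent2_py_alt (word1 : String) (word2 : String) (num : Int) : Bool :=
  altLoop word1.toList word2.toList num 0

-- ===== PRECONDITION & SPEC =====
-- Pre_ holds exactly when Python A returns: either word2 is at least as long as word1, or the
-- counter reaches exactly 4 before word2 runs out (num ≤ 4 and at least 4 - num matching
-- positions among the zipped prefix); otherwise A (and B) raise IndexError.
def Pre_adjacent2_py (word1 : String) (word2 : String) (num : Int) : Prop :=
  word1.toList.length ≤ word2.toList.length ∨
    (num ≤ 4 ∧ 4 - num ≤ ((word1.toList.zip word2.toList).countP fun p => p.1 == p.2))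
instance (word1 : String) (word2 : String) (num : Int) : Decidable (Pre_adjacent2_py word1 word2 num) := by unfold Pre_adjacent2_py; infer_instance

def pvWitness_adjacent2_py : String × String × Int := ("cold", "cord", 0)

def Spec_adjacent2_py (word1 : String) (word2 : String) (num : Int) (out : Bool) : Prop := out = adjacent2_py_alt word1 word2 num
instance (word1 : String) (word2 : String) (num : Int) (out : Bool) : Decidable (Spec_adjacent2_py word1 word2 num out) := by unfold Spec_adjacent2_py; infer_instance

-- ===== CLAIM (what is proved, stated in full; the proofs are below) =====
def Claim_equal_adjacent2_py : Prop := ∀ (word1 : String) (word2 : String) (num : Int), Dom_adjacent2_py word1 word2 num → Pre_adjacent2_py word1 word2 num → Spec_adjacent2_py word1 word2 num (adjacent2_py word1 word2 num)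

-- ===== LEMMAS AND PROOFS =====

-- The two loops agree (everywhere, as Lean functions): aGo on the i-dropped lists equals altLoop at index i.
lemma aGo_eq_altLoop : ∀ (n : Nat) (l1 l2 : List Char) (num : Int) (i : Nat),
    l1.length - i = n → aGo (l1.drop i) (l2.drop i) num = altLoop l1 l2 num i := by
  intro n
  induction n with
  | zero =>
    intro l1 l2 num i h
    have hle : l1.length ≤ i := by omega
    rw [aGo.eq_def, altLoop]
    simp [List.drop_eq_nil_of_le hle, hle]
  | succ n ih =>
    intro l1 l2 num i h
    have hi : i < l1.length := by omega
    rw [aGo.eq_def, altLoop]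
    by_cases h4 : num = 4
    · simp [h4]
    · have hle : ¬ l1.length ≤ i := by omega
      simp only [h4, if_false, hle]
      rw [List.drop_eq_getElem_cons hi]
      simp only [List.head?_drop, List.tail_drop]
      have hg1 : l1[i]? = some l1[i] := List.getElem?_eq_getElem hi
      have := ih l1 l2 (num + 1) (i + 1) (by omega)
      have := ih l1 l2 num (i + 1) (by omega)
      by_cases hc : (some l1[i] == l2[i]?) = true
      · simp_all
      · simp_all

-- ===== VERDICT (by name: the statement is the Claim_ definition above) =====
theorem adjacent2_py_spec : Claim_equal_adjacent2_py := by
  intro w1 w2 num _ _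
  unfold Spec_adjacent2_py adjacent2_py adjacent2_py_alt
  simpa using aGo_eq_altLoop (w1.toList.length) w1.toList w2.toList num 0 (by omega)
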